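-- pv_equiv track=rewrite | github.com/Anmol-Singh-Jaggi/interview-notes | notes/algo-ds-practice/problems/greedy/shop_in_candy_store.py | min_max_candy
-- ===== SOURCE A (Python) =====
-- def min_max_candy(prices, k):
--     idx1 = 0
--     idx2 = len(prices) - 1
--     ans = 0
--     free = 0
--     while idx1 <= idx2:
--         ans += prices[idx1]
--         for i in range(k):
--             if idx2 <= idx1:
--                 break
--             free += prices[idx2]
--             idx2 -= 1
--         idx1 += 1
--     assert free + ans == sum(prices)
--     return ans
-- ===== SOURCE B (Python) =====
-- def min_max_candy(prices, k):
--     n = len(prices)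
--     b = n if k <= 0 else -(-n // (k + 1))
--     return sum(prices[:b])
-- ===== Notes on version B (the rewrite author's own statement) =====
-- stated objective: simpler
-- what changed: Replaces the two-pointer element-by-element simulation (and its always-true assert) with a closed-form count of paid candies b = ceil(n/(k+1)) (b = n for k <= 0) and a single prefix-slice sum.
import Mathlib
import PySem

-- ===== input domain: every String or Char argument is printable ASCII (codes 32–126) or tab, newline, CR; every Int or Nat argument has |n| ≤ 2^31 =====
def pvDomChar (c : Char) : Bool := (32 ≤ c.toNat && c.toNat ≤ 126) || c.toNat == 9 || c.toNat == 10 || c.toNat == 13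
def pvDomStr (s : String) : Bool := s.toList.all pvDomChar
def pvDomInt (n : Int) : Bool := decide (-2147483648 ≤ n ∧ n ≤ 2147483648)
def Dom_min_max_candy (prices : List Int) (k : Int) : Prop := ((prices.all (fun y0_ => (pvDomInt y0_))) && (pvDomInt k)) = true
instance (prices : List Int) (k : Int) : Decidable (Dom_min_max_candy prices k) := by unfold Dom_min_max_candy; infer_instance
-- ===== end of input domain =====

-- B replaces A's two-pointer simulation with a closed-form count of paid candies
-- plus a prefix-slice sum (objective: simpler).

-- ===== PORT A =====
-- the inner 'for i in range(k)' loop: iterates max(k,0) times, breaking when idx2 <= idx1;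
-- state (idx2, free).  prices[idx2] is always in range here (idx1 < idx2 < len), so pyGetD 0 is exact.
def pvInnerA (prices : List Int) (idx1 : Int) : Nat → Int → Int → Int × Int
  | 0, idx2, free => (idx2, free)
  | c + 1, idx2, free =>
    if idx2 ≤ idx1 then (idx2, free)
    else pvInnerA prices idx1 c (idx2 - 1) (free + PySem.List.pyGetD prices idx2 0)

-- needed by outerA's termination proof
theorem pvInnerA_fst_le (prices : List Int) (idx1 : Int) :
    ∀ (c : Nat) (idx2 free : Int), (pvInnerA prices idx1 c idx2 free).1 ≤ idx2 := by
  intro c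
  induction c with
  | zero => intro idx2 free; simp [pvInnerA]
  | succ c ih =>
    intro idx2 free
    simp only [pvInnerA]
    split
    · exact le_refl _
    · exact le_trans (ih _ _) (by omega)

-- the outer 'while idx1 <= idx2' loop; prices[idx1] is always in range (0 ≤ idx1 ≤ idx2 < len)
def pvOuterA (prices : List Int) (k : Int) (idx1 idx2 ans free : Int) : Int :=
  if idx1 ≤ idx2 then
    let ans' := ans + PySem.List.pyGetD prices idx1 0
    let st := pvInnerA prices idx1 k.toNat idx2 free
    pvOuterA prices k (idx1 + 1) st.1 ans' st.2
  else ans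
termination_by (idx2 - idx1 + 1).toNat
decreasing_by
  have h := pvInnerA_fst_le prices idx1 k.toNat idx2 free
  omega

-- the Python assert `free + ans == sum(prices)` always holds (each element lands in exactly
-- one of ans/free), so A always returns ans
def min_max_candy (prices : List Int) (k : Int) : Int :=
  pvOuterA prices k 0 (PySem.List.len prices - 1) 0 0

-- ===== PORT B =====
def min_max_candy_alt (prices : List Int) (k : Int) : Int :=
  let n : Int := PySem.List.len prices
  let b : Int := if k ≤ 0 then n else -(PySem.Int.floordiv (-n) (k + 1))
  (PySem.List.slice prices none (some b)).sum

-- ===== PRECONDITION & SPEC =====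
def Spec_min_max_candy (prices : List Int) (k : Int) (out : Int) : Prop := out = min_max_candy_alt prices k
instance (prices : List Int) (k : Int) (out : Int) : Decidable (Spec_min_max_candy prices k out) := by unfold Spec_min_max_candy; infer_instance

-- ===== CLAIM (what is proved, stated in full; the proofs are below) =====
def Claim_equal_min_max_candy : Prop := ∀ (prices : List Int) (k : Int), Dom_min_max_candy prices k → Spec_min_max_candy prices k (min_max_candy prices k)

-- ===== LEMMAS AND PROOFS =====

-- number of candies A pays for when L candies remain and each paid candy takes min(kN, remaining) free ones
def pvPaid (kN : Nat) : Nat → Nat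
  | 0 => 0
  | L + 1 => 1 + pvPaid kN (L - min kN L)
decreasing_by omega

theorem pvInnerA_fst (prices : List Int) (idx1 : Int) :
    ∀ (c : Nat) (idx2 free : Int), idx1 ≤ idx2 →
      (pvInnerA prices idx1 c idx2 free).1 = max idx1 (idx2 - c) := by
  intro c
  induction c with
  | zero => intro idx2 free h; simp [pvInnerA]; omega
  | succ c ih =>
    intro idx2 free h
    simp only [pvInnerA]
    split
    · simp; omega
    · rw [ih (idx2 - 1) _ (by omega)]; omega

theorem pvOuterA_eq (prices : List Int) (k : Int) :
    ∀ (L : Nat) (idx1 idx2 ans free : Int), (idx2 - idx1 + 1).toNat = L → 0 ≤ idx1 →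
      idx2 < (prices.length : Int) →
      pvOuterA prices k idx1 idx2 ans free
        = ans + ((prices.drop idx1.toNat).take (pvPaid k.toNat L)).sum := by
  intro L
  induction L using Nat.strong_induction_on with
  | _ L IH =>
    intro idx1 idx2 ans free hL h1 h2
    match L, hL with
    | 0, hL =>
      have hlt : idx2 < idx1 := by omega
      rw [pvOuterA, if_neg (by omega)]
      simp [pvPaid]
    | M + 1, hL =>
      have hle : idx1 ≤ idx2 := by omega
      rw [pvOuterA, if_pos hle]
      have hfst := pvInnerA_fst prices idx1 k.toNat idx2 free hle
      set st := pvInnerA prices idx1 k.toNat idx2 free with hst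
      have hL' : (st.1 - (idx1 + 1) + 1).toNat = M - min k.toNat M := by
        rw [hfst]; omega
      rw [IH (M - min k.toNat M) (by omega) (idx1 + 1) st.1 _ st.2 hL' (by omega)
        (by rw [hfst]; omega)]
      have hidx : idx1.toNat < prices.length := by omega
      have hget : PySem.List.pyGetD prices idx1 0 = prices[idx1.toNat] :=
        PySem.List.pyGetD_eq_getElem prices 0 (by omega) (by omega)
      have hnext : (idx1 + 1).toNat = idx1.toNat + 1 := by omega
      rw [hget, hnext, List.drop_eq_getElem_cons hidx]
      show _ = ans + ((prices[idx1.toNat] :: prices.drop (idx1.toNat + 1)).take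
        (pvPaid k.toNat (M + 1))).sum
      rw [pvPaid, Nat.add_comm 1 (pvPaid k.toNat (M - min k.toNat M)), List.take_succ_cons,
        List.sum_cons]
      ring

theorem pvPaid_zero (L : Nat) : pvPaid 0 L = L := by
  induction L with
  | zero => simp [pvPaid]
  | succ M ih => rw [pvPaid]; simp only [Nat.zero_min, Nat.sub_zero, ih]; omega

theorem pvPaid_bracket (k : Int) (hk : 1 ≤ k) :
    ∀ L : Nat, ((pvPaid k.toNat L : Int) - 1) * (k + 1) < (L : Int) ∧
      (L : Int) ≤ (pvPaid k.toNat L : Int) * (k + 1) := by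
  intro L
  induction L using Nat.strong_induction_on with
  | _ L IH =>
    match L with
    | 0 =>
      constructor
      · simp [pvPaid]; nlinarith
      · simp [pvPaid]
    | M + 1 =>
      have hkN : (k.toNat : Int) = k := by omega
      rw [pvPaid]
      by_cases hc : k.toNat ≤ M
      · have hIH := IH (M - min k.toNat M) (by omega)
        have hm : ((M - min k.toNat M : Nat) : Int) = (M : Int) - k := by omega
        rw [hm] at hIH
        push_cast
        constructor
        · nlinarith [hIH.1]
        · nlinarith [hIH.2]
      · have hm : M - min k.toNat M = 0 := by omega
        have h0 : pvPaid k.toNat 0 = 0 := by simp [pvPaid]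
        rw [hm, h0]
        push_cast
        constructor
        · nlinarith [hkN]
        · nlinarith [hkN]

-- ===== VERDICT (by name: the statement is the Claim_ definition above) =====
theorem min_max_candy_spec : Claim_equal_min_max_candy := by
  intro prices k _
  unfold Spec_min_max_candy min_max_candy min_max_candy_alt
  simp only [PySem.List.len_eq]
  have hA := pvOuterA_eq prices k prices.length 0 ((prices.length : Int) - 1) 0 0
    (by omega) (by omega) (by omega)
  rw [hA]
  simp only [Int.toNat_zero, List.drop_zero, zero_add]
  by_cases hk : k ≤ 0
  · rw [if_pos hk]
    have : k.toNat = 0 := by omega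
    rw [this, pvPaid_zero, PySem.List.slice_to_natCast, List.take_length]
  · rw [if_neg hk]
    have hb : -(PySem.Int.floordiv (-(prices.length : Int)) (k + 1))
        = ((pvPaid k.toNat prices.length : Nat) : Int) := by
      rw [PySem.Int.neg_floordiv_neg_eq_iff_of_pos (by omega)]
      exact pvPaid_bracket k (by omega) prices.length
    rw [hb, PySem.List.slice_to_natCast]
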